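-- pv_equiv track=rewrite | github.com/Cal9233/pdf_converting | pdf_v2/fix_chase_parser.py | fix_doubled_text
-- ===== SOURCE A (Python) =====
-- def fix_doubled_text(text):
--     """Fix doubled characters in text like 'MMaannaaggee' -> 'Manage'"""
--     result = []
--     i = 0
--     while i < len(text):
--         if i + 1 < len(text) and text[i] == text[i + 1]:
--             result.append(text[i])
--             i += 2  # Skip the duplicate
--         else:
--             result.append(text[i])
--             i += 1
--     return ''.join(result)
-- ===== SOURCE B (Python) =====
-- def fix_doubled_text(text):
--     """Fix doubled characters in text like 'MMaannaaggee' -> 'Manage'"""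
--     out = []
--     i = 0
--     n = len(text)
--     while i < n:
--         j = i
--         while j < n and text[j] == text[i]:
--             j += 1
--         out.append(text[i] * ((j - i + 1) // 2))
--         i = j
--     return ''.join(out)
-- ===== Notes on version B (the rewrite author's own statement) =====
-- stated objective: alternative
-- what changed: Replaces the pairwise skip-by-2 scan with a run-length traversal: find each maximal run of equal characters and emit ceil(L/2) copies of it at once.
import Mathlib
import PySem

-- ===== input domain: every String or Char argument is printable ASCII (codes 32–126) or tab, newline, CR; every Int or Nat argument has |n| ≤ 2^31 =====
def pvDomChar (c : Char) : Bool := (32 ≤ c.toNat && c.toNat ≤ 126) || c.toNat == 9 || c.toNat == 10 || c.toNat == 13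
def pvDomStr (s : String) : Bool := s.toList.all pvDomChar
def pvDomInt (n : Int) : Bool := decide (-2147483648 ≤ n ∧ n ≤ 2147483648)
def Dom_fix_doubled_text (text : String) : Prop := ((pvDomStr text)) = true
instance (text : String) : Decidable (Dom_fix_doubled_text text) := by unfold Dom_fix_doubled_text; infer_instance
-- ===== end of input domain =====

-- B collapses doubled characters by emitting ceil(L/2) copies per maximal run instead of A's
-- pairwise skip-by-2 scan; objective: alternative (same O(n) cost, different traversal).

-- ===== PORT A =====
-- A's while loop over index i, looking at text[i] and text[i+1]:
def fixLoopA : List Char → List Char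
  | [] => []
  | [a] => [a]
  | a :: b :: rest =>
      if a = b then a :: fixLoopA rest
      else a :: fixLoopA (b :: rest)

def fix_doubled_text (text : String) : String :=
  String.ofList (fixLoopA text.toList)

-- ===== PORT B =====
-- length of the inner while loop's run: how many leading chars of l equal c
def runLen (c : Char) : List Char → Nat
  | [] => 0
  | a :: rest => if a = c then runLen c rest + 1 else 0

def fixLoopB : List Char → List Char
  | [] => []
  | c :: rest =>
      let n := runLen c rest + 1
      List.replicate ((n + 1) / 2) c ++ fixLoopB (List.drop (runLen c rest) rest)
termination_by l => l.length
decreasing_by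
  simp

def fix_doubled_text_alt (text : String) : String :=
  String.ofList (fixLoopB text.toList)

-- ===== PRECONDITION & SPEC =====
def Spec_fix_doubled_text (text : String) (out : String) : Prop := out = fix_doubled_text_alt text
instance (text : String) (out : String) : Decidable (Spec_fix_doubled_text text out) := by unfold Spec_fix_doubled_text; infer_instance

-- ===== CLAIM (what is proved, stated in full; the proofs are below) =====
def Claim_equal_fix_doubled_text : Prop := ∀ (text : String), Dom_fix_doubled_text text → Spec_fix_doubled_text text (fix_doubled_text text)

-- ===== LEMMAS AND PROOFS =====

-- the suffix after the run does not start with c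
lemma head?_drop_runLen (c : Char) : ∀ (l : List Char),
    (List.drop (runLen c l) l).head? ≠ some c := by
  intro l
  induction l with
  | nil => simp
  | cons a t ih =>
      by_cases h : a = c
      · simpa [runLen, h] using ih
      · simp [runLen, h]

-- a list is its leading run followed by the rest
lemma replicate_runLen_append (c : Char) : ∀ (l : List Char),
    List.replicate (runLen c l) c ++ List.drop (runLen c l) l = l := by
  intro l
  induction l with
  | nil => simp [runLen]
  | cons a t ih =>
      by_cases h : a = c
      · subst h; simpa [runLen, List.replicate_succ] using ih
      · simp [runLen, h]

-- A's loop on a maximal run emits ceil(n/2) copies of c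
lemma fixLoopA_run : ∀ (n : Nat) (c : Char) (rest : List Char),
    rest.head? ≠ some c →
    fixLoopA (List.replicate n c ++ rest)
      = List.replicate ((n + 1) / 2) c ++ fixLoopA rest := by
  intro n
  induction n using Nat.strong_induction_on with
  | _ n ih =>
    match n with
    | 0 => intro c rest _; simp
    | 1 =>
        intro c rest h
        cases rest with
        | nil => simp [fixLoopA]
        | cons b t =>
            have hb : ¬ c = b := by
              intro hcb; exact h (by simp [hcb.symm])
            simp [fixLoopA, hb]
    | (m + 2) =>
        intro c rest h
        have hrep : List.replicate (m + 2) c ++ rest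
            = c :: c :: (List.replicate m c ++ rest) := by
          simp [List.replicate_succ]
        rw [hrep]
        simp only [fixLoopA, if_true, eq_self_iff_true]
        rw [ih m (by omega) c rest h]
        have hdiv : (m + 2 + 1) / 2 = (m + 1) / 2 + 1 := by omega
        simp [hdiv, List.replicate_succ]

lemma fixLoopA_eq_fixLoopB : ∀ (l : List Char), fixLoopA l = fixLoopB l := by
  have key : ∀ (N : Nat) (l : List Char), l.length ≤ N → fixLoopA l = fixLoopB l := by
    intro N
    induction N with
    | zero =>
        intro l h
        have : l = [] := List.eq_nil_of_length_eq_zero (Nat.le_zero.mp h)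
        subst this
        rw [fixLoopA, fixLoopB]
    | succ N ih =>
        intro l h
        cases l with
        | nil => rw [fixLoopA, fixLoopB]
        | cons c rest =>
            have hdec : c :: rest
                = List.replicate (runLen c rest + 1) c
                    ++ List.drop (runLen c rest) rest := by
              rw [List.replicate_succ]
              simp [replicate_runLen_append c rest]
            conv_lhs => rw [hdec]
            rw [fixLoopA_run (runLen c rest + 1) c _ (head?_drop_runLen c rest)]
            rw [fixLoopB]
            have hlen : (List.drop (runLen c rest) rest).length ≤ N := by
              have := List.length_drop (l := rest) (i := runLen c rest)
              have hr : rest.length ≤ N := by simpa using Nat.le_of_succ_le_succ h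
              omega
            rw [ih _ hlen]
  intro l
  exact key l.length l le_rfl

-- ===== VERDICT (by name: the statement is the Claim_ definition above) =====
theorem fix_doubled_text_spec : Claim_equal_fix_doubled_text := by
  intro text _
  unfold Spec_fix_doubled_text fix_doubled_text fix_doubled_text_alt
  rw [fixLoopA_eq_fixLoopB]
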